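-- pv_equiv track=rewrite | github.com/paiml/depyler | examples/hard_final_lang_lambda.py | shift_var
-- ===== SOURCE A (Python) =====
-- def make_abs(body: list[int]) -> list[int]:
--     """Create lambda abstraction wrapping body."""
--     result: list[int] = [1, len(body)]
--     i: int = 0
--     while i < len(body):
--         bv: int = body[i]
--         result.append(bv)
--         i = i + 1
--     return result
--
-- def shift_var(term: list[int], cutoff: int, amount: int) -> list[int]:
--     """Shift free variables in term by amount above cutoff."""
--     tag: int = term[0]
--     if tag == 0:
--         idx: int = term[1]
--         if idx >= cutoff:
--             return [0, idx + amount]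
--         return [0, idx]
--     if tag == 1:
--         blen: int = term[1]
--         body: list[int] = []
--         i: int = 0
--         while i < blen:
--             bv: int = term[2 + i]
--             body.append(bv)
--             i = i + 1
--         shifted_body: list[int] = shift_var(body, cutoff + 1, amount)
--         return make_abs(shifted_body)
--     return term
-- ===== SOURCE B (Python) =====
-- def shift_var(term: list[int], cutoff: int, amount: int) -> list[int]:
--     """Shift free variables in term by amount above cutoff.
--
--     Iterative: walk down the abstraction chain counting depth, handle the
--     leaf once, then rebuild the wrappers; no recursion and no make_abs helper
--     (each wrapper is just [1, len(res)] + res)."""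
--     t = term
--     depth = 0
--     while t[0] == 1:
--         blen = t[1]
--         inner = []
--         for i in range(blen):
--             inner.append(t[2 + i])
--         t = inner
--         depth += 1
--     if t[0] == 0:
--         idx = t[1]
--         res = [0, idx + amount] if idx >= cutoff + depth else [0, idx]
--     else:
--         res = t
--     for _ in range(depth):
--         res = [1, len(res)] + res
--     return res
-- ===== Notes on version B (the rewrite author's own statement) =====
-- stated objective: alternative
-- what changed: Replaces A's recursion (extract body, recurse, re-wrap via make_abs's copy loop) by an iterative two-phase pass: a loop walks down the abstraction chain counting depth, the leaf is handled once, and a second loop rebuilds the wrappers as [1, len(res)] + res, eliminating make_abs and the recursion.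
import Mathlib
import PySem

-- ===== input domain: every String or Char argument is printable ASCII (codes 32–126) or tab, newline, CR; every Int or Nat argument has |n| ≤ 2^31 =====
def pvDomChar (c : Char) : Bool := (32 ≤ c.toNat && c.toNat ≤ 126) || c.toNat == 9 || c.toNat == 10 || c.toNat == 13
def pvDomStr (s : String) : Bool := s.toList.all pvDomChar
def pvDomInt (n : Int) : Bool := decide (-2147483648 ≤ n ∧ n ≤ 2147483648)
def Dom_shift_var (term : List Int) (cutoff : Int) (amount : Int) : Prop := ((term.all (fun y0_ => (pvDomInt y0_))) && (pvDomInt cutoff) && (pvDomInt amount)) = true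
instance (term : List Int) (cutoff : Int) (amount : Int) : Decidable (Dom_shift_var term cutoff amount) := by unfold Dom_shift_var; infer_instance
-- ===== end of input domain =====

-- B replaces A's recursion + make_abs copy loop by an iterative descend/count-depth/rebuild pass (alternative decomposition, same cost); equal on all well-formed terms (Pre_), i.e. wherever the Python A returns instead of raising IndexError.


-- ===== PORT A =====
-- A's make_abs: result = [1, len(body)], then while i < len(body): result.append(body[i]).
-- fuel counts the remaining loop iterations (body.length at entry) and only makes the loop total;
-- the guard i < len(body) keeps the access body[i] in range, so plain getElem is exact.
def makeAbsLoop (body : List Int) : Nat → Nat → List Int → List Int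
  | 0, _, res => res
  | fuel + 1, i, res =>
    if h : i < body.length then makeAbsLoop body fuel (i + 1) (res ++ [body[i]]) else res

def make_abs (body : List Int) : List Int :=
  makeAbsLoop body body.length 0 [1, (body.length : Int)]

-- A's body-extraction while loop: i from 0 while i < blen, body.append(term[2+i]); none = IndexError.
-- fuel = (blen - i).toNat at entry counts the remaining iterations and only makes the loop total.
def collectBody (term : List Int) (blen : Int) : Nat → Int → List Int → Option (List Int)
  | 0, _, acc => some acc
  | fuel + 1, i, acc =>
    if i < blen then
      match PySem.List.pyGet? term (2 + i) with
      | none => none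
      | some bv => collectBody term blen fuel (i + 1) (acc ++ [bv])
    else some acc

-- the recursion of A; fuel only bounds the recursion depth (term.length + 1 at entry always suffices:
-- each extracted body is at least two shorter than its term)
def shiftGo : Nat → List Int → Int → Int → List Int
  | 0, _, _, _ => []
  | fuel + 1, term, cutoff, amount =>
    match PySem.List.pyGet? term 0 with
    | none => []                                   -- IndexError (outside Pre_)
    | some tag =>
      if tag = 0 then
        match PySem.List.pyGet? term 1 with
        | none => []                               -- IndexError (outside Pre_)
        | some idx => if idx ≥ cutoff then [0, idx + amount] else [0, idx]
      else if tag = 1 then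
        match PySem.List.pyGet? term 1 with
        | none => []                               -- IndexError (outside Pre_)
        | some blen =>
          match collectBody term blen blen.toNat 0 [] with
          | none => []                             -- IndexError (outside Pre_)
          | some body => make_abs (shiftGo fuel body (cutoff + 1) amount)
      else term

def shift_var (term : List Int) (cutoff : Int) (amount : Int) : List Int :=
  shiftGo (term.length + 1) term cutoff amount

-- ===== PORT B =====
-- the list comprehension [t[2+i] for i in range(blen)]; none = IndexError
def collectRange (t : List Int) : List Int → Option (List Int)
  | [] => some []
  | i :: rest =>
    match PySem.List.pyGet? t (2 + i) with
    | none => none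
    | some v =>
      match collectRange t rest with
      | none => none
      | some vs => some (v :: vs)

-- B's while loop: walk down the tag-1 chain counting depth; none = IndexError somewhere on the way.
-- fuel only bounds the number of loop iterations (term.length + 1 at entry always suffices).
def descGo : Nat → List Int → Nat → Option (List Int × Nat)
  | 0, _, _ => none
  | fuel + 1, t, depth =>
    match PySem.List.pyGet? t 0 with
    | none => none
    | some tag =>
      if tag = 1 then
        match PySem.List.pyGet? t 1 with
        | none => none
        | some blen =>
          match collectRange t (PySem.List.pyRange 0 blen 1) with
          | none => none
          | some inner => descGo fuel inner (depth + 1)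
      else some (t, depth)

-- B's leaf handling: res = [0, idx+amount] if idx >= cutoff+depth else [0, idx], or t unchanged
def leafStep (t : List Int) (c a : Int) : List Int :=
  match PySem.List.pyGet? t 0 with
  | none => []                                   -- IndexError (outside Pre_)
  | some tag =>
    if tag = 0 then
      match PySem.List.pyGet? t 1 with
      | none => []                               -- IndexError (outside Pre_)
      | some idx => if idx ≥ c then [0, idx + a] else [0, idx]
    else t

-- B's rebuild loop: for _ in range(depth): res = [1, len(res)] + res
def rebuild : Nat → List Int → List Int
  | 0, r => r
  | n + 1, r => rebuild n ((1 : Int) :: (r.length : Int) :: r)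

def shift_var_alt (term : List Int) (cutoff : Int) (amount : Int) : List Int :=
  match descGo (term.length + 1) term 0 with
  | none => []                                   -- IndexError (outside Pre_)
  | some (t, depth) => rebuild depth (leafStep t (cutoff + (depth : Int)) amount)

-- ===== PRECONDITION & SPEC =====
-- the well-formed length-prefixed terms, as a linear scan down the header chain:
-- avail is how many elements of the rest of the list still belong to the current (sub)term
def wfGo : List Int → Nat → Bool
  | [], _ => false
  | tag :: rest, avail =>
    if avail = 0 then false
    else if tag = 0 then decide (2 ≤ avail)
    else if tag = 1 then
      match rest with
      | [] => false
      | blen :: rest' => decide (0 ≤ blen) && decide (blen.toNat + 2 ≤ avail) && wfGo rest' blen.toNat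
    else true

-- Pre_ is exactly the set of inputs on which the Python A returns (everywhere else it raises IndexError:
-- empty term, missing slot for term[1], stated body length negative, zero, or larger than the actual body)
def Pre_shift_var (term : List Int) (cutoff : Int) (amount : Int) : Prop :=
  wfGo term term.length = true
instance (term : List Int) (cutoff : Int) (amount : Int) : Decidable (Pre_shift_var term cutoff amount) := by unfold Pre_shift_var; infer_instance

def pvWitness_shift_var : List Int × Int × Int := ([1, 2, 0, 5], 0, 3)

def Spec_shift_var (term : List Int) (cutoff : Int) (amount : Int) (out : List Int) : Prop := out = shift_var_alt term cutoff amount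
instance (term : List Int) (cutoff : Int) (amount : Int) (out : List Int) : Decidable (Spec_shift_var term cutoff amount out) := by unfold Spec_shift_var; infer_instance

-- ===== CLAIM (what is proved, stated in full; the proofs are below) =====
def Claim_equal_shift_var : Prop := ∀ (term : List Int) (cutoff : Int) (amount : Int), Dom_shift_var term cutoff amount → Pre_shift_var term cutoff amount → Spec_shift_var term cutoff amount (shift_var term cutoff amount)

-- ===== LEMMAS AND PROOFS =====

theorem get1 (x y : Int) (l : List Int) : PySem.List.pyGet? (x :: y :: l) 1 = some y := by
  rw [PySem.List.pyGet?_of_nonneg _ (by norm_num)]; rfl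

-- proof-side well-formedness, by recursion on the extracted body (mirrors A's recursion shape)
def wfTerm : List Int → Bool
  | [] => false
  | tag :: rest =>
    if tag = 0 then decide (1 ≤ rest.length)
    else if tag = 1 then
      match rest with
      | [] => false
      | blen :: rest' =>
        decide (0 ≤ blen) && decide (blen.toNat ≤ rest'.length) && wfTerm (rest'.take blen.toNat)
    else true
termination_by t => t.length
decreasing_by simp [List.length_take]

-- the linear-scan grammar implies body-recursion well-formedness of the admitted prefix
theorem wfGo_to_wfTerm : ∀ (n : Nat) (l : List Int) (avail : Nat), l.length ≤ n →
    avail ≤ l.length → wfGo l avail = true → wfTerm (l.take avail) = true := by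
  intro n
  induction n with
  | zero =>
    intro l avail hlen hav hwf
    cases l with
    | nil => simp [wfGo] at hwf
    | cons tag rest => simp at hlen
  | succ n ih =>
    intro l avail hlen hav hwf
    rcases l with _ | ⟨tag, _ | ⟨blen, rest'⟩⟩
    · simp [wfGo] at hwf
    · -- l = [tag]
      rw [wfGo] at hwf
      by_cases hz : avail = 0
      · rw [if_pos hz] at hwf; simp at hwf
      rw [if_neg hz] at hwf
      have hav1 : avail = 1 := by simp at hav; omega
      subst hav1
      by_cases ht0 : tag = 0
      · rw [if_pos ht0] at hwf; simp at hwf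
      rw [if_neg ht0] at hwf
      by_cases ht1 : tag = 1
      · rw [if_pos ht1] at hwf; simp at hwf
      rw [if_neg ht1] at hwf
      rw [show List.take 1 [tag] = [tag] from rfl, wfTerm.eq_def]
      simp [if_neg ht0, if_neg ht1]
    · -- l = tag :: blen :: rest'
      rw [wfGo] at hwf
      by_cases hz : avail = 0
      · rw [if_pos hz] at hwf; simp at hwf
      rw [if_neg hz] at hwf
      by_cases ht0 : tag = 0
      · subst ht0
        rw [if_pos rfl] at hwf
        simp only [decide_eq_true_eq] at hwf
        obtain ⟨a, ha⟩ : ∃ a, avail = a + 1 := ⟨avail - 1, by omega⟩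
        subst ha
        rw [List.take_succ_cons, wfTerm.eq_def]
        norm_num [List.length_take]
        omega
      rw [if_neg ht0] at hwf
      by_cases ht1 : tag = 1
      · subst ht1
        rw [if_pos rfl] at hwf
        simp only [Bool.and_eq_true, decide_eq_true_eq] at hwf
        obtain ⟨⟨hb0, hba⟩, hgo⟩ := hwf
        obtain ⟨a', ha⟩ : ∃ a', avail = a' + 2 := ⟨avail - 2, by omega⟩
        subst ha
        simp only [List.length_cons] at hlen hav
        rw [List.take_succ_cons, List.take_succ_cons, wfTerm.eq_def]
        norm_num
        have hrest' : blen.toNat ≤ rest'.length := by omega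
        have htt : (rest'.take a').take blen.toNat = rest'.take blen.toNat := by
          rw [List.take_take]
          congr 1
          omega
        refine ⟨⟨hb0, ?_⟩, ?_⟩
        · omega
        · rw [htt]
          exact ih rest' blen.toNat (by omega) hrest' hgo
      · rw [if_neg ht1] at hwf
        obtain ⟨a, ha⟩ : ∃ a, avail = a + 1 := ⟨avail - 1, by omega⟩
        subst ha
        rw [List.take_succ_cons, wfTerm.eq_def]
        simp only [if_neg ht0, if_neg ht1]

-- make_abs is prepend-length-and-copy
theorem makeAbsLoop_eq (body : List Int) :
    ∀ (fuel i : Nat) (res : List Int), body.length ≤ i + fuel →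
      makeAbsLoop body fuel i res = res ++ body.drop i := by
  intro fuel
  induction fuel with
  | zero =>
    intro i res h
    have : body.drop i = [] := List.drop_eq_nil_iff.mpr (by omega)
    simp [makeAbsLoop, this]
  | succ fuel ih =>
    intro i res h
    rw [makeAbsLoop]
    by_cases hi : i < body.length
    · rw [dif_pos hi, ih (i + 1) _ (by omega), List.append_assoc]
      congr 1
      rw [List.drop_eq_getElem_cons hi]
      simp
    · rw [dif_neg hi]
      have : body.drop i = [] := List.drop_eq_nil_iff.mpr (by omega)
      simp [this]

theorem make_abs_eq (body : List Int) : make_abs body = 1 :: (body.length : Int) :: body := by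
  rw [make_abs, makeAbsLoop_eq body body.length 0 _ (by omega)]
  simp

-- A's extraction loop returns exactly the length-prefixed slice when it is in range
theorem collectBody_slice (term : List Int) (blen : Int) (hlen : blen + 2 ≤ (term.length : Int)) :
    ∀ (fuel : Nat) (i : Int) (acc : List Int), (blen - i).toNat ≤ fuel → 0 ≤ i → i ≤ blen →
      collectBody term blen fuel i acc =
        some (acc ++ (term.drop (2 + i.toNat)).take (blen - i).toNat) := by
  intro fuel
  induction fuel with
  | zero =>
    intro i acc hf hi hib
    have h2 : (blen - i).toNat = 0 := by omega
    rw [collectBody, h2]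
    simp
  | succ fuel ih =>
    intro i acc hf hi hib
    rw [collectBody]
    by_cases hlt : i < blen
    · rw [if_pos hlt]
      rw [PySem.List.pyGet?_eq_some_getElem term (by omega) (by omega)]
      show collectBody term blen fuel (i + 1) (acc ++ [term[(2 + i).toNat]]) = _
      rw [ih (i + 1) _ (by omega) (by omega) (by omega)]
      congr 1
      rw [List.append_assoc]
      congr 1
      have h1 : 2 + (i + 1).toNat = (2 + i.toNat) + 1 := by omega
      have h2 : (blen - i).toNat = (blen - (i + 1)).toNat + 1 := by omega
      simp only [show (2 + i).toNat = 2 + i.toNat from by omega]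
      rw [h1, h2, List.drop_eq_getElem_cons (by omega : 2 + i.toNat < term.length),
        List.take_succ_cons]
      simp
    · rw [if_neg hlt]
      have h2 : (blen - i).toNat = 0 := by omega
      rw [h2]
      simp

-- B's comprehension over range(blen) returns the same slice
theorem collectRange_slice (t : List Int) (blen : Int) (hlen : blen + 2 ≤ (t.length : Int)) :
    ∀ (k : Nat) (j : Int), (blen - j).toNat ≤ k → 0 ≤ j → j ≤ blen →
      collectRange t (PySem.List.pyRange j blen 1) =
        some ((t.drop (2 + j.toNat)).take (blen - j).toNat) := by
  intro k
  induction k with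
  | zero =>
    intro j h h0 hb
    have hjb : j = blen := by omega
    subst hjb
    rw [PySem.List.pyRange_one_eq_nil (le_refl j)]
    simp [collectRange]
  | succ k ih =>
    intro j h h0 hb
    by_cases hjb : j < blen
    · rw [PySem.List.pyRange_one_cons hjb]
      simp only [collectRange]
      rw [PySem.List.pyGet?_eq_some_getElem t (by omega) (by omega)]
      rw [ih (j + 1) (by omega) (by omega) (by omega)]
      simp only [Option.some.injEq]
      have h1 : 2 + (j + 1).toNat = (2 + j.toNat) + 1 := by omega
      have h2 : (blen - j).toNat = (blen - (j + 1)).toNat + 1 := by omega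
      simp only [show (2 + j).toNat = 2 + j.toNat from by omega]
      rw [h1, h2, List.drop_eq_getElem_cons (by omega : 2 + j.toNat < t.length),
        List.take_succ_cons]
    · have hjb' : j = blen := by omega
      subst hjb'
      rw [PySem.List.pyRange_one_eq_nil (le_refl j)]
      have h2 : (j - j).toNat = 0 := by omega
      rw [h2]
      simp [collectRange]

-- wrapping commutes with n-fold rebuild (both are iterates of the same wrap)
theorem rebuild_wrap : ∀ (n : Nat) (r : List Int),
    rebuild n ((1 : Int) :: (r.length : Int) :: r) =
      (1 : Int) :: ((rebuild n r).length : Int) :: rebuild n r := by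
  intro n
  induction n with
  | zero => intro r; rfl
  | succ n ih =>
    intro r
    simp only [rebuild]
    rw [ih]

-- reduction equations for the two ports, on the shapes Pre_ admits
theorem shiftGo_tag0 (fuel : Nat) (idx : Int) (r2 : List Int) (c a : Int) :
    shiftGo (fuel + 1) (0 :: idx :: r2) c a = if idx ≥ c then [0, idx + a] else [0, idx] := by
  simp only [shiftGo, PySem.List.pyGet?_zero_cons, get1]
  norm_num

theorem shiftGo_other (fuel : Nat) (tag : Int) (rest : List Int) (c a : Int)
    (h0 : tag ≠ 0) (h1 : tag ≠ 1) :
    shiftGo (fuel + 1) (tag :: rest) c a = tag :: rest := by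
  simp only [shiftGo, PySem.List.pyGet?_zero_cons]
  rw [if_neg h0, if_neg h1]

theorem shiftGo_tag1 (fuel : Nat) (blen : Int) (rest' body : List Int) (c a : Int)
    (hb : collectBody (1 :: blen :: rest') blen blen.toNat 0 [] = some body) :
    shiftGo (fuel + 1) (1 :: blen :: rest') c a = make_abs (shiftGo fuel body (c + 1) a) := by
  simp only [shiftGo, PySem.List.pyGet?_zero_cons, get1]
  norm_num
  rw [hb]

theorem descGo_leaf (fuel : Nat) (tag : Int) (rest : List Int) (d : Nat) (h1 : tag ≠ 1) :
    descGo (fuel + 1) (tag :: rest) d = some (tag :: rest, d) := by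
  simp only [descGo, PySem.List.pyGet?_zero_cons]
  rw [if_neg h1]

theorem descGo_tag1 (fuel : Nat) (blen : Int) (rest' inner : List Int) (d : Nat)
    (hcr : collectRange (1 :: blen :: rest') (PySem.List.pyRange 0 blen 1) = some inner) :
    descGo (fuel + 1) (1 :: blen :: rest') d = descGo fuel inner (d + 1) := by
  simp only [descGo, PySem.List.pyGet?_zero_cons, get1]
  norm_num
  rw [hcr]

-- the main invariant: B's descend/rebuild pass computes A's recursion, at any start depth d
theorem descend_shift : ∀ (fuel : Nat) (term : List Int), term.length < fuel → wfTerm term = true →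
    ∀ (c a : Int) (d : Nat), ∃ lf dep, descGo fuel term d = some (lf, dep) ∧ d ≤ dep ∧
      rebuild (dep - d) (leafStep lf (c + ((dep - d : Nat) : Int)) a) = shiftGo fuel term c a := by
  intro fuel
  induction fuel with
  | zero => intro term hlen; omega
  | succ fuel ih =>
    intro term hlen hwf c a d
    cases term with
    | nil => simp [wfTerm] at hwf
    | cons tag rest =>
      by_cases ht1 : tag = 1
      · subst ht1
        rw [wfTerm.eq_def] at hwf
        norm_num at hwf
        cases rest with
        | nil => simp at hwf
        | cons blen rest' =>
          simp only [Bool.and_eq_true, decide_eq_true_eq] at hwf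
          obtain ⟨⟨hb0, hbl⟩, hwfb⟩ := hwf
          have hlen2 : blen + 2 ≤ ((1 :: blen :: rest').length : Int) := by
            simp; omega
          have hcb : collectBody (1 :: blen :: rest') blen blen.toNat 0 [] =
              some (rest'.take blen.toNat) := by
            have := collectBody_slice (1 :: blen :: rest') blen hlen2 blen.toNat 0 []
              (by omega) (le_refl 0) hb0
            simpa using this
          have hcr : collectRange (1 :: blen :: rest') (PySem.List.pyRange 0 blen 1) =
              some (rest'.take blen.toNat) := by
            have := collectRange_slice (1 :: blen :: rest') blen hlen2 blen.toNat 0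
              (by omega) (le_refl 0) hb0
            simpa using this
          have hbodylen : (rest'.take blen.toNat).length < fuel := by
            simp only [List.length_take]
            simp at hlen
            omega
          obtain ⟨lf, dep, hdesc, hle, hreb⟩ := ih (rest'.take blen.toNat) hbodylen hwfb (c + 1) a (d + 1)
          refine ⟨lf, dep, ?_, by omega, ?_⟩
          · rw [descGo_tag1 fuel blen rest' _ d hcr]
            exact hdesc
          · rw [shiftGo_tag1 fuel blen rest' _ c a hcb, ← hreb, make_abs_eq]
            have e1 : dep - d = (dep - (d + 1)) + 1 := by omega
            have e2 : c + ((dep - d : Nat) : Int) = (c + 1) + ((dep - (d + 1) : Nat) : Int) := by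
              omega
            rw [e2, e1, rebuild, rebuild_wrap]
      · refine ⟨tag :: rest, d, descGo_leaf fuel tag rest d ht1, le_refl d, ?_⟩
        rw [Nat.sub_self]
        simp only [rebuild, Nat.cast_zero, add_zero]
        by_cases ht0 : tag = 0
        · subst ht0
          rw [wfTerm.eq_def] at hwf
          norm_num at hwf
          cases rest with
          | nil => simp at hwf
          | cons idx rest2 =>
            rw [shiftGo_tag0]
            simp only [leafStep, PySem.List.pyGet?_zero_cons, get1]
            norm_num
        · rw [shiftGo_other fuel tag rest c a ht0 ht1]
          simp only [leafStep, PySem.List.pyGet?_zero_cons]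
          rw [if_neg ht0]

-- ===== VERDICT (by name: the statement is the Claim_ definition above) =====
theorem shift_var_spec : Claim_equal_shift_var := by
  intro term cutoff amount _ hpre
  have hwf : wfTerm term = true := by
    have := wfGo_to_wfTerm term.length term term.length (le_refl _) (le_refl _) hpre
    rwa [List.take_length] at this
  unfold Spec_shift_var shift_var_alt shift_var
  obtain ⟨lf, dep, hdesc, _, hreb⟩ :=
    descend_shift (term.length + 1) term (by omega) hwf cutoff amount 0
  rw [hdesc]
  simp only [Nat.sub_zero] at hreb
  exact hreb.symm
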